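-- pv_equiv track=rewrite | github.com/RuotianJoy/AI | greedy_optimizer.py | _generate_bitmasks
-- ===== SOURCE A (Python) =====
-- from itertools import combinations
--
-- def _generate_bitmasks(size, choice):
--     """
--     Generate bitmask version of combination matrix
--     Each combination is represented as an integer, where 1s in binary representation indicate selected elements
--     """
--     position = list(combinations(range(size), choice))
--     bitmasks = []
--     for pos in position:
--         mask = 0
--         for p in pos:
--             mask |= (1 << p)  # Set bit at position p to 1
--         bitmasks.append(mask)
--     return bitmasks
-- ===== SOURCE B (Python) =====
-- def _generate_bitmasks(size, choice):
--     """Iterative level-wise enumeration: level r holds every viable r-element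
--     prefix as (mask, next_start); each round extends all prefixes by one
--     position, keeping lexicographic order.  A pick at p must leave room for
--     the picks still to come (p < size - remaining_after_pick)."""
--     level = [(0, 0)]
--     for r in range(choice):
--         if not level:
--             break
--         slack = size - (choice - r - 1)
--         level = [(m | (1 << p), p + 1) for (m, s) in level for p in range(s, slack)]
--     return [m for (m, _) in level]
-- ===== Notes on version B (the rewrite author's own statement) =====
-- stated objective: alternative
-- what changed: Replaces the itertools.combinations tuple list plus a second mask-building pass by an iterative level-wise expansion that keeps all viable r-element prefixes as (mask, next_start) pairs and extends each by one position per round, emitting the masks directly in the same lexicographic order.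
-- outside the precondition, e.g. on _generate_bitmasks(3, -1): A raises ValueError, B returns [0]
import Mathlib
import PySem

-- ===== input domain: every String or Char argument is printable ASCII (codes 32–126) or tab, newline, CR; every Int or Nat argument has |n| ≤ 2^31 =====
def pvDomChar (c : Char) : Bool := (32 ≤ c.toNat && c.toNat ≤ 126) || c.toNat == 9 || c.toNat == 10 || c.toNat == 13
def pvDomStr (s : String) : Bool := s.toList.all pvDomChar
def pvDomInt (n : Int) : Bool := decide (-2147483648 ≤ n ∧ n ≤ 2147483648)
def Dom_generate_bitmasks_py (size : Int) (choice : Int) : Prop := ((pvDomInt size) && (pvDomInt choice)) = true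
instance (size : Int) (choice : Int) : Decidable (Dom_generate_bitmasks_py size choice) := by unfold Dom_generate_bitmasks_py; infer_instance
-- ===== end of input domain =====

-- B replaces the itertools.combinations tuple list plus second mask pass by an
-- iterative level-wise prefix expansion building the masks directly (objective: alternative).

-- ===== PORT A =====
-- itertools.combinations(xs, k) as a list of lists, in lexicographic order:
-- combinations keeping the head first, then combinations of the tail.
def pyCombs : List Int → Nat → List (List Int)
  | _, 0 => [[]]
  | [], _ + 1 => []
  | x :: xs, k + 1 =>
    -- itertools prunes immediately when r > n ('if r > n: return'): same guard here
    if xs.length < k then []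
    else (pyCombs xs k).map (fun c => x :: c) ++ pyCombs xs (k + 1)

-- mask |= (1 << p); p comes from range(size) so p ≥ 0 and toNat is exact
def maskStep (m p : Int) : Int := Int.lor m ((1 : Int) <<< p.toNat)

def generate_bitmasks_py (size : Int) (choice : Int) : List Int :=
  let position := pyCombs (PySem.List.pyRange 0 size 1) choice.toNat
  position.foldl (fun bitmasks pos => bitmasks ++ [pos.foldl maskStep 0]) []

-- ===== PORT B =====
-- one round of Source B's loop ('if not level: break' = the step is the identity on [])
def bmStep (size : Int) (choice : Int) (level : List (Int × Int)) (r : Int) : List (Int × Int) :=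
  if level = [] then level
  else level.flatMap (fun ms =>
    (PySem.List.pyRange ms.2 (size - (choice - r - 1)) 1).map
      (fun p => (maskStep ms.1 p, p + 1)))

def generate_bitmasks_py_alt (size : Int) (choice : Int) : List Int :=
  ((PySem.List.pyRange 0 choice 1).foldl (bmStep size choice) [(0, 0)]).map (fun ms => ms.1)

-- ===== PRECONDITION & SPEC =====
-- Pre excludes choice < 0, where Python A raises ValueError (itertools.combinations).
def Pre_generate_bitmasks_py (size : Int) (choice : Int) : Prop := 0 ≤ choice
instance (size : Int) (choice : Int) : Decidable (Pre_generate_bitmasks_py size choice) := by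
  unfold Pre_generate_bitmasks_py; infer_instance

def pvWitness_generate_bitmasks_py : Int × Int := (4, 2)

def Spec_generate_bitmasks_py (size : Int) (choice : Int) (out : List Int) : Prop := out = generate_bitmasks_py_alt size choice
instance (size : Int) (choice : Int) (out : List Int) : Decidable (Spec_generate_bitmasks_py size choice out) := by unfold Spec_generate_bitmasks_py; infer_instance

-- ===== CLAIM (what is proved, stated in full; the proofs are below) =====
def Claim_equal_generate_bitmasks_py : Prop := ∀ (size : Int) (choice : Int), Dom_generate_bitmasks_py size choice → Pre_generate_bitmasks_py size choice → Spec_generate_bitmasks_py size choice (generate_bitmasks_py size choice)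

-- ===== LEMMAS AND PROOFS =====

theorem foldl_concat_eq_map {α β : Type} (f : α → β) :
    ∀ (xs : List α) (acc : List β),
      xs.foldl (fun a x => a ++ [f x]) acc = acc ++ xs.map f := by
  intro xs
  induction xs with
  | nil => simp
  | cons x xs ih => intro acc; simp [List.foldl, ih]

theorem pyCombs_eq_nil_of_lt : ∀ (xs : List Int) (k : Nat), xs.length < k → pyCombs xs k = [] := by
  intro xs
  induction xs with
  | nil => intro k h; cases k with
    | zero => omega
    | succ k => rfl
  | cons x xs ih =>
    intro k h
    cases k with
    | zero => omega
    | succ k =>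
      have hl : xs.length < k := by simpa using h
      simp [pyCombs, hl]

-- the unguarded Pascal-style equation, valid with the pruning guard too
theorem pyCombs_cons_succ (x : Int) (xs : List Int) (k : Nat) :
    pyCombs (x :: xs) (k + 1) = (pyCombs xs k).map (fun c => x :: c) ++ pyCombs xs (k + 1) := by
  by_cases hl : xs.length < k
  · rw [pyCombs_eq_nil_of_lt xs k hl, pyCombs_eq_nil_of_lt xs (k+1) (by omega),
        pyCombs_eq_nil_of_lt (x :: xs) (k+1) (by simpa using hl)]
    rfl
  · simp [pyCombs, hl]

-- all completions of the prefix (mask, next_start) by j further picks, as masks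
def bmCompl (size : Int) (j : Nat) (ms : Int × Int) : List Int :=
  (pyCombs (PySem.List.pyRange ms.2 size 1) j).map (fun pos => pos.foldl maskStep ms.1)

theorem pyCombs_zero (xs : List Int) : pyCombs xs 0 = [[]] := by cases xs <;> rfl

theorem bmCompl_zero (size : Int) (ms : Int × Int) : bmCompl size 0 ms = [ms.1] := by
  rw [bmCompl, pyCombs_zero]; rfl

theorem bmCompl_expand (size : Int) :
    ∀ (n : Nat) (s : Int), (size - s).toNat ≤ n → ∀ (j : Nat) (m : Int),
      bmCompl size (j + 1) (m, s) =
        (PySem.List.pyRange s (size - j) 1).flatMap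
          (fun p => bmCompl size j (maskStep m p, p + 1)) := by
  intro n
  induction n with
  | zero =>
    intro s h j m
    have hle : size ≤ s := by omega
    rw [bmCompl, PySem.List.pyRange_one_eq_nil hle, PySem.List.pyRange_one_eq_nil (by omega : size - (j:Int) ≤ s)]
    rfl
  | succ n ih =>
    intro s h j m
    by_cases hs : s < size - j
    · have hlt : s < size := by omega
      rw [bmCompl, PySem.List.pyRange_one_cons hlt, pyCombs_cons_succ,
          PySem.List.pyRange_one_cons hs]
      have hrec : ((pyCombs (PySem.List.pyRange (s+1) size 1) (j+1)).map
          (fun pos => pos.foldl maskStep m)) =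
          (PySem.List.pyRange (s+1) (size - j) 1).flatMap
            (fun p => bmCompl size j (maskStep m p, p + 1)) := by
        have := ih (s + 1) (by omega) j m
        rw [bmCompl] at this
        exact this
      simp only [List.flatMap_cons, List.map_append, List.map_map, hrec]
      congr 1
    · have hnil : pyCombs (PySem.List.pyRange s size 1) (j + 1) = [] := by
        apply pyCombs_eq_nil_of_lt
        rw [PySem.List.length_pyRange_one]
        omega
      rw [bmCompl, hnil, PySem.List.pyRange_one_eq_nil (by omega : size - (j:Int) ≤ s)]
      rfl

theorem bmLoop_inv (size : Int) (k : Nat) :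
    ∀ (j : Nat), j ≤ k → ∀ (level : List (Int × Int)),
      ((PySem.List.pyRange ((k : Int) - j) k 1).foldl (bmStep size k) level).flatMap
          (bmCompl size 0)
        = level.flatMap (bmCompl size j) := by
  intro j
  induction j with
  | zero =>
    intro _ level
    rw [show ((k : Int) - (0:Nat)) = (k : Int) by push_cast; ring,
        PySem.List.pyRange_one_eq_nil le_rfl]
    rfl
  | succ j ih =>
    intro hj level
    have hlt : (k : Int) - (j+1 : Nat) < k := by push_cast; omega
    rw [PySem.List.pyRange_one_cons hlt,
        show ((k : Int) - ((j+1 : Nat) : Int)) + 1 = (k : Int) - (j : Nat) by push_cast; ring,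
        List.foldl_cons, ih (by omega)]
    by_cases hl : level = []
    · subst hl; simp [bmStep]
    · rw [bmStep, if_neg hl]
      rw [List.flatMap_assoc]
      apply List.flatMap_congr  -- pointwise over level
      intro ms _
      rw [show size - ((k : Int) - (((k : Int) - ((j+1 : Nat) : Int))) - 1) = size - (j : Nat) by push_cast; ring]
      rw [List.flatMap_map]
      exact (bmCompl_expand size (size - ms.2).toNat ms.2 le_rfl j ms.1).symm

-- ===== VERDICT (by name: the statement is the Claim_ definition above) =====
theorem generate_bitmasks_py_spec : Claim_equal_generate_bitmasks_py := by
  intro size choice _ hpre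
  unfold Spec_generate_bitmasks_py generate_bitmasks_py generate_bitmasks_py_alt
  have hc : ((choice.toNat : Int)) = choice := Int.toNat_of_nonneg hpre
  rw [← hc, foldl_concat_eq_map, List.nil_append]
  have key := bmLoop_inv size choice.toNat choice.toNat le_rfl [(0, 0)]
  simp only [sub_self] at key
  have hmap : ∀ l : List (Int × Int), l.flatMap (bmCompl size 0) = l.map (fun ms => ms.1) := by
    intro l
    induction l with
    | nil => rfl
    | cons x xs ih => simp [List.flatMap_cons, bmCompl_zero, ih]
  rw [← hmap, key]
  simp [bmCompl]
  congr 2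
  omega
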